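-- pv_equiv track=rewrite | github.com/NikeSmitt/geekbrains_algorithms_main | hw_2/task_5.py | task_5
-- ===== SOURCE A (Python) =====
-- def task_5(table='', pos=32):
--     if pos > 127:
--         return table
--
--     if table != '':
--         end_ch = '\n' if not (pos - 1) % 10 else ' '
--     else:
--         end_ch = ''
--     new_table = f'{table}{end_ch}{pos:>3d} - {chr(pos)}'
--     return task_5(new_table, pos + 1)
-- ===== SOURCE B (Python) =====
-- def task_5(table='', pos=32):
--     parts = []
--     for p in range(pos, 128):
--         sep = '\n' if (p - 1) % 10 == 0 else ' '
--         parts.append(f'{sep}{p:>3d} - {chr(p)}')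
--     body = ''.join(parts)
--     return table + body if table else body[1:]
-- ===== Notes on version B (the rewrite author's own statement) =====
-- stated objective: idiomatic
-- what changed: Replaces A's recursion on a growing accumulator string with a single pass that formats one segment per code point, joins them, and trims the leading separator when the starting table is empty.
import Mathlib
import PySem

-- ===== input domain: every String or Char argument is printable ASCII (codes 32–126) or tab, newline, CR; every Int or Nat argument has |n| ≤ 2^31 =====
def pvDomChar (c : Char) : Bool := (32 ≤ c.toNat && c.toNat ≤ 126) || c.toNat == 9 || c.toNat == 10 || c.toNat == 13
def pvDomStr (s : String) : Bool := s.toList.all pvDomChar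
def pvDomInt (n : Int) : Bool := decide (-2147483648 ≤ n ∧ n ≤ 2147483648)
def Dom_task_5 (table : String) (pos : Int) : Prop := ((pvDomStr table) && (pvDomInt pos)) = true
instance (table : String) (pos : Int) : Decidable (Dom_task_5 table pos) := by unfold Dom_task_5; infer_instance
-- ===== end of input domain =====

-- B builds the ASCII table iteratively: it formats one segment per code point, joins them, and trims the
-- leading separator when the starting table is empty — instead of A's recursion on a growing accumulator.

-- ===== PORT A =====
-- chr(n); exact for 0 ≤ n ≤ 127, the only values reached under Pre_
def pvChr (n : Int) : Char := Char.ofNat n.toNat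
-- f'{n:>3d}': str(n) right-justified to width 3 with spaces
def pvFmt3 (n : Int) : List Char :=
  let ds := PySem.Int.toChars n
  List.replicate (3 - ds.length) ' ' ++ ds
-- the f-string piece f'{p:>3d} - {chr(p)}' (used by both f-strings, A's and B's)
def pvEntry (p : Int) : List Char := pvFmt3 p ++ (' ' :: '-' :: ' ' :: [pvChr p])

def task_5 (table : String) (pos : Int) : String :=
  if pos > 127 then table
  else
    let end_ch : List Char :=
      if table.toList ≠ [] then (if PySem.Int.mod (pos - 1) 10 = 0 then ['\n'] else [' ']) else []
    let new_table := String.ofList (table.toList ++ end_ch ++ pvEntry pos)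
    task_5 new_table (pos + 1)
termination_by (128 - pos).toNat
decreasing_by omega

-- ===== PORT B =====
def task_5_alt (table : String) (pos : Int) : String :=
  let parts : List (List Char) :=
    (PySem.List.pyRange pos 128 1).map (fun p =>
      (if PySem.Int.mod (p - 1) 10 = 0 then '\n' else ' ') :: pvEntry p)
  let body := PySem.Chars.join [] parts
  if table.toList ≠ [] then String.ofList (table.toList ++ body)
  else String.ofList (PySem.List.slice body (some 1) none)

-- ===== PRECONDITION & SPEC =====
-- A raises ValueError (chr of a negative code point) exactly when pos < 0; it returns on all pos ≥ 0.
def Pre_task_5 (table : String) (pos : Int) : Prop := 0 ≤ pos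
instance (table : String) (pos : Int) : Decidable (Pre_task_5 table pos) := by unfold Pre_task_5; infer_instance
def pvWitness_task_5 : String × Int := ("", 120)
def Spec_task_5 (table : String) (pos : Int) (out : String) : Prop := out = task_5_alt table pos
instance (table : String) (pos : Int) (out : String) : Decidable (Spec_task_5 table pos out) := by unfold Spec_task_5; infer_instance

-- ===== CLAIM (what is proved, stated in full; the proofs are below) =====
def Claim_equal_task_5 : Prop := ∀ (table : String) (pos : Int), Dom_task_5 table pos → Pre_task_5 table pos → Spec_task_5 table pos (task_5 table pos)

-- ===== LEMMAS AND PROOFS =====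

-- ''.join over a cons (specific to B's empty separator; not in the PySem lemma book)
lemma join_empty_cons (x : List Char) (xs : List (List Char)) :
    PySem.Chars.join [] (x :: xs) = x ++ PySem.Chars.join [] xs := by
  cases xs <;> simp [PySem.Chars.join_singleton, PySem.Chars.join_cons_cons, PySem.Chars.join_nil]

-- B's joined body, as a function of the starting position
def bodyL (pos : Int) : List Char :=
  PySem.Chars.join [] ((PySem.List.pyRange pos 128 1).map (fun p =>
    (if PySem.Int.mod (p - 1) 10 = 0 then '\n' else ' ') :: pvEntry p))

lemma bodyL_stop {pos : Int} (h : 128 ≤ pos) : bodyL pos = [] := by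
  unfold bodyL
  rw [show PySem.List.pyRange pos 128 1 = [] by
    simp [PySem.List.pyRange]; omega]
  simp [PySem.Chars.join_nil]

lemma bodyL_step {pos : Int} (h : pos ≤ 127) :
    bodyL pos = ((if PySem.Int.mod (pos - 1) 10 = 0 then '\n' else ' ') :: pvEntry pos) ++ bodyL (pos + 1) := by
  unfold bodyL
  rw [PySem.List.pyRange_one_cons (by omega : pos < 128)]
  rw [List.map_cons, join_empty_cons]

lemma pvEntry_ne_nil (p : Int) : pvEntry p ≠ [] := by
  simp [pvEntry]

lemma task_5_of_ne_nil (n : Nat) : ∀ (pos : Int) (t : List Char), (128 - pos).toNat = n → t ≠ [] →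
    task_5 (String.ofList t) pos = String.ofList (t ++ bodyL pos) := by
  induction n with
  | zero =>
    intro pos t hn _
    rw [task_5, if_pos (by omega : pos > 127), bodyL_stop (by omega), List.append_nil]
  | succ n ih =>
    intro pos t hn ht
    have hle : pos ≤ 127 := by omega
    rw [task_5, if_neg (by omega : ¬ pos > 127)]
    simp only [String.toList_ofList, if_pos ht, List.append_assoc]
    rw [ih (pos + 1) (t ++ ((if PySem.Int.mod (pos - 1) 10 = 0 then ['\n'] else [' ']) ++ pvEntry pos))
        (by omega) (List.append_ne_nil_of_right_ne_nil _ (List.append_ne_nil_of_right_ne_nil _ (pvEntry_ne_nil pos)))]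
    rw [bodyL_step hle]
    congr 1
    split_ifs <;> simp

-- ===== VERDICT (by name: the statement is the Claim_ definition above) =====
theorem task_5_spec : Claim_equal_task_5 := by
  intro table pos _dom hpre
  unfold Spec_task_5 task_5_alt
  by_cases ht : table.toList = []
  · simp only [ht, ne_eq, not_true_eq_false, if_false]
    by_cases hstop : pos > 127
    · rw [task_5, if_pos hstop]
      rw [show PySem.List.pyRange pos 128 1 = [] by simp [PySem.List.pyRange]; omega]
      simp [PySem.Chars.join_nil, PySem.List.slice]
      simpa using congrArg String.ofList ht
    · rw [task_5, if_neg hstop]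
      simp only [ht, ne_eq, not_true_eq_false, if_false, List.nil_append]
      rw [task_5_of_ne_nil (128 - (pos + 1)).toNat (pos + 1) _ rfl (pvEntry_ne_nil pos)]
      show String.ofList (pvEntry pos ++ bodyL (pos + 1)) = String.ofList (PySem.List.slice (bodyL pos) (some 1) none)
      rw [bodyL_step (pos := pos) (by omega), PySem.List.slice_from_one]
      rfl
  · conv_lhs => rw [show table = String.ofList table.toList by simp]
    rw [task_5_of_ne_nil (128 - pos).toNat pos table.toList rfl ht]
    simp only [ne_eq, ht, not_false_eq_true, if_true]
    rfl
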